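-- pv_equiv track=rewrite | github.com/Coding-Of-Death/CodingTest | 210321/semain_모의고사.py | solution
-- ===== SOURCE A (Python) =====
-- def solution(answers):
--     answer = []
--     cnt1 = 0
--     cnt2 = 0
--     cnt3 = 0
--
--     a = [1,2,3,4,5]
--     b = [2,1,2,3,2,4,2,5]
--     c = [3,3,1,1,2,2,4,4,5,5]
--
--
--     for i in range(len(answers)):
--         if answers[i]==a[i%5]:
--             cnt1 += 1
--         if answers[i]==b[i%8]:
--             cnt2 += 1
--         if answers[i]==c[i%10]:
--             cnt3 += 1
--
--     max_num = max(cnt1, cnt2, cnt3)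
--     if max_num == cnt1:
--         answer.append(1)
--     if max_num == cnt2:
--         answer.append(2)
--     if max_num == cnt3:
--         answer.append(3)
--
--     answer.sort()
--
--     return answer
-- ===== SOURCE B (Python) =====
-- def solution(answers):
--     # Histogram: bucket answers by (position mod 40, value); lcm(5,8,10)=40,
--     # so each pattern's score is a 40-term lookup sum, no per-pattern scan of answers.
--     keyed = [(i % 40, x) for i, x in enumerate(answers)]
--     freq = {}
--     for k in keyed:
--         freq[k] = freq.get(k, 0) + 1
--     patterns = [[1, 2, 3, 4, 5],
--                 [2, 1, 2, 3, 2, 4, 2, 5],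
--                 [3, 3, 1, 1, 2, 2, 4, 4, 5, 5]]
--     counts = [sum(freq.get((r, p[r % len(p)]), 0) for r in range(40))
--               for p in patterns]
--     best = max(counts)
--     return [j + 1 for j, c in enumerate(counts) if c == best]
-- ===== Notes on version B (the rewrite author's own statement) =====
-- stated objective: alternative
-- what changed: A's fused per-element comparison loop with three counters and append-then-sort output is replaced by a histogram algorithm: answers are bucketed once into a dict keyed by (index mod 40, value) (40 = lcm of the pattern lengths), each pattern's score becomes a fixed 40-term dictionary-lookup sum that never rescans the answers, and the result is a max-filter over the counts list which is inherently ascending.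
import Mathlib
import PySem

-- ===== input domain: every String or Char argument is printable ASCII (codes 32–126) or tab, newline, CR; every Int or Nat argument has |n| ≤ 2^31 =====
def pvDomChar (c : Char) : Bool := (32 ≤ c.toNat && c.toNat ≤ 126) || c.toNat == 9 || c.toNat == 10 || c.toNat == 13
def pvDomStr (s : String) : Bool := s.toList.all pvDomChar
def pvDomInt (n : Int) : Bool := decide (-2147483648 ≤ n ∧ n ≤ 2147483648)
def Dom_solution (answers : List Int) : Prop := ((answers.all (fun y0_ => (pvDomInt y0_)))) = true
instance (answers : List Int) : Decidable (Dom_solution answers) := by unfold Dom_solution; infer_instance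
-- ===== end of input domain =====

-- B replaces A's fused per-element loop with three counters by a histogram keyed by
-- (index mod 40, value) built once; each pattern's score is then a 40-term lookup sum,
-- and the result is a max-filter over the counts list (no sort needed).

-- ===== PORT A =====
def solution (answers : List Int) : List Int :=
  let a : List Int := [1,2,3,4,5]
  let b : List Int := [2,1,2,3,2,4,2,5]
  let c : List Int := [3,3,1,1,2,2,4,4,5,5]
  let st := (PySem.List.pyRange 0 (PySem.List.len answers) 1).foldl
    (fun (s : Int × Int × Int) i =>
      (if PySem.List.pyGetD answers i 0 = PySem.List.pyGetD a (PySem.Int.mod i 5) 0 then s.1 + 1 else s.1,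
       if PySem.List.pyGetD answers i 0 = PySem.List.pyGetD b (PySem.Int.mod i 8) 0 then s.2.1 + 1 else s.2.1,
       if PySem.List.pyGetD answers i 0 = PySem.List.pyGetD c (PySem.Int.mod i 10) 0 then s.2.2 + 1 else s.2.2))
    (0, 0, 0)
  let maxNum := max st.1 (max st.2.1 st.2.2)
  let answer : List Int :=
    ((([] : List Int)
      ++ (if maxNum = st.1 then [1] else []))
      ++ (if maxNum = st.2.1 then [2] else []))
      ++ (if maxNum = st.2.2 then [3] else [])
  PySem.List.sorted answer (fun x => x) false

-- ===== PORT B =====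
def solution_alt (answers : List Int) : List Int :=
  let keyed : List (Int × Int) :=
    (PySem.List.enumerate answers 0).map (fun ix => (PySem.Int.mod ix.1 40, ix.2))
  let freq : PySem.Dict (Int × Int) Int :=
    keyed.foldl (fun d k => d.insert k (d.getD k 0 + 1)) PySem.Dict.empty
  let patterns : List (List Int) := [[1,2,3,4,5],[2,1,2,3,2,4,2,5],[3,3,1,1,2,2,4,4,5,5]]
  let counts : List Int := patterns.map (fun p =>
    (PySem.List.pyRange 0 40 1).foldl
      (fun acc r => acc + freq.getD (r, PySem.List.pyGetD p (PySem.Int.mod r (PySem.List.len p)) 0) 0) 0)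
  let best : Int := (PySem.List.max? counts (fun x => x)).getD 0
  (PySem.List.enumerate counts 0).filterMap (fun jc => if jc.2 = best then some (jc.1 + 1) else none)

-- ===== PRECONDITION & SPEC =====
def Spec_solution (answers : List Int) (out : List Int) : Prop := out = solution_alt answers
instance (answers : List Int) (out : List Int) : Decidable (Spec_solution answers out) := by unfold Spec_solution; infer_instance

-- ===== CLAIM (what is proved, stated in full; the proofs are below) =====
def Claim_equal_solution : Prop := ∀ (answers : List Int), Dom_solution answers → Spec_solution answers (solution answers)

-- ===== LEMMAS AND PROOFS =====

-- sum of a pointwise-added map splits into two sums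
theorem map_add_sum_distrib_int {a : Type} (l : List a) (f g : a -> Int) :
    (l.map (fun x => f x + g x)).sum = (l.map f).sum + (l.map g).sum := by
  induction l with
  | nil => simp
  | cons x l ih => simp only [List.map_cons, List.sum_cons, ih]; ring

-- a counting fold with an if-test is the sum of 0/1 indicators
theorem foldl_ite_count (f : Int -> Prop) [DecidablePred f] :
    forall (l : List Int) (a : Int),
    l.foldl (fun s i => if f i then s + 1 else s) a
      = a + (l.map (fun i => if f i then (1:Int) else 0)).sum := by
  intro l
  induction l with
  | nil => intro a; simp
  | cons i l ih =>
    intro a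
    rw [List.foldl_cons, ih, List.map_cons, List.sum_cons]
    split_ifs <;> ring

-- indicator sum over an index list not containing j is 0
theorem ind_sum_zero (q : Int -> Int) (j x : Int) :
    forall (R : List Int), j ∉ R ->
    (R.map (fun r => if (j, x) = (r, q r) then (1:Int) else 0)).sum = 0 := by
  intro R
  induction R with
  | nil => intro _; simp
  | cons r R ih =>
    intro hj
    rw [List.map_cons, List.sum_cons, ih (fun h => hj (List.mem_cons_of_mem _ h)),
        add_zero, if_neg]
    intro h
    have hr : j = r := (Prod.mk.injEq _ _ _ _ |>.mp h).1
    subst hr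
    exact hj List.mem_cons_self

-- indicator sum over a duplicate-free index list containing j: only the term at j survives
theorem ind_sum (q : Int -> Int) (j x : Int) :
    forall (R : List Int), R.Nodup -> j ∈ R ->
    (R.map (fun r => if (j, x) = (r, q r) then (1:Int) else 0)).sum
      = if x = q j then 1 else 0 := by
  intro R
  induction R with
  | nil => intro _ hj; cases hj
  | cons r R ih =>
    intro hnd hj
    rw [List.map_cons, List.sum_cons]
    by_cases hr : r = j
    · subst hr
      rw [ind_sum_zero q r x R (List.nodup_cons.mp hnd).1, add_zero]
      by_cases hx : x = q r
      · rw [if_pos (by rw [hx]), if_pos hx]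
      · rw [if_neg (fun h => hx (Prod.mk.injEq _ _ _ _ |>.mp h).2), if_neg hx]
    · have hjR : j ∈ R := by
        rcases List.mem_cons.mp hj with h | h
        · exact absurd h.symm hr
        · exact h
      rw [if_neg (fun h => hr ((Prod.mk.injEq _ _ _ _ |>.mp h).1).symm), zero_add,
          ih (List.nodup_cons.mp hnd).2 hjR]

-- histogram sum over residues 0..39 = per-element indicator sum (pattern length divides 40)
theorem hist (p : List Int) (L : Int) (hL : 0 < L) (hdvd : L ∣ 40) :
    forall (xs : List Int) (k : Int), 0 <= k ->
    ((PySem.List.pyRange 0 40 1).map (fun r =>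
        ((((PySem.List.enumerate xs k).map (fun ix => (PySem.Int.mod ix.1 40, ix.2))).count
          (r, PySem.List.pyGetD p (PySem.Int.mod r L) 0) : Nat) : Int))).sum
    = ((PySem.List.enumerate xs k).map
        (fun ix => if ix.2 = PySem.List.pyGetD p (PySem.Int.mod ix.1 L) 0 then (1:Int) else 0)).sum := by
  intro xs
  induction xs with
  | nil => intro k _; simp [PySem.List.enumerate_nil]
  | cons x xs ih =>
    intro k hk
    rw [PySem.List.enumerate_cons]
    simp only [List.map_cons, List.sum_cons, List.count_cons, beq_iff_eq]
    push_cast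
    rw [map_add_sum_distrib_int
          (PySem.List.pyRange 0 40 1)
          (fun r => (((PySem.List.enumerate xs (k+1)).map (fun ix => (PySem.Int.mod ix.1 40, ix.2))).count
            (r, PySem.List.pyGetD p (PySem.Int.mod r L) 0) : Int))
          (fun r => if ((PySem.Int.mod k 40 : Int), x) = (r, PySem.List.pyGetD p (PySem.Int.mod r L) 0) then (1:Int) else 0)]
    rw [ih (k+1) (by omega)]
    have hmem : PySem.Int.mod k 40 ∈ PySem.List.pyRange 0 40 1 := by
      rw [PySem.List.mem_pyRange_one]
      exact ⟨PySem.Int.mod_nonneg k (by norm_num), PySem.Int.mod_lt k (by norm_num)⟩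
    have hmm : PySem.Int.mod (PySem.Int.mod k 40) L = PySem.Int.mod k L := by
      rw [PySem.Int.mod_eq_emod_of_pos hL, PySem.Int.mod_eq_emod_of_pos hL,
          PySem.Int.mod_eq_emod_of_pos (by norm_num : (0:Int) < 40),
          Int.emod_emod_of_dvd _ hdvd]
    rw [ind_sum (fun r => PySem.List.pyGetD p (PySem.Int.mod r L) 0)
          (PySem.Int.mod k 40) x (PySem.List.pyRange 0 40 1)
          (PySem.List.nodup_pyRange_one 0 40) hmem]
    simp only [hmm]
    ring

-- B's histogram count for one pattern equals A's per-index fold for that pattern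
theorem cnt_eq (p : List Int) (L : Int) (hL : 0 < L) (hdvd : L ∣ 40)
    (hlen : PySem.List.len p = L) (answers : List Int) :
    (PySem.List.pyRange 0 40 1).foldl
      (fun acc r => acc +
        (((PySem.List.enumerate answers 0).map (fun ix => (PySem.Int.mod ix.1 40, ix.2))).foldl
          (fun d k => d.insert k (d.getD k 0 + 1)) PySem.Dict.empty).getD
          (r, PySem.List.pyGetD p (PySem.Int.mod r (PySem.List.len p)) 0) 0) (0 : Int)
    = (PySem.List.pyRange 0 (PySem.List.len answers) 1).foldl
      (fun s i => if PySem.List.pyGetD answers i 0 = PySem.List.pyGetD p (PySem.Int.mod i L) 0 then s + 1 else s) (0 : Int) := by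
  rw [hlen]
  have hcnt : forall v : Int × Int,
      (((PySem.List.enumerate answers 0).map (fun ix => (PySem.Int.mod ix.1 40, ix.2))).foldl
        (fun d k => d.insert k (d.getD k 0 + 1)) PySem.Dict.empty).getD v 0
      = (((PySem.List.enumerate answers 0).map (fun ix => (PySem.Int.mod ix.1 40, ix.2))).count v : Int) := by
    intro v
    rw [PySem.Dict.foldl_insert_getD_add_one_eq_counter, PySem.Dict.getD_counter]
  simp only [hcnt]
  rw [PySem.List.foldl_add, hist p L hL hdvd answers 0 le_rfl]
  rw [foldl_ite_count (fun i => PySem.List.pyGetD answers i 0 = PySem.List.pyGetD p (PySem.Int.mod i L) 0)]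
  rw [PySem.List.enumerate_eq_map_pyRange (d := 0), List.map_map]
  rfl

-- final selection: A's append-chain-then-sort equals B's max-filter over the counts list
theorem final_eq (c1 c2 c3 : Int) :
    PySem.List.sorted
      (((([] : List Int)
        ++ (if max c1 (max c2 c3) = c1 then [1] else []))
        ++ (if max c1 (max c2 c3) = c2 then [2] else []))
        ++ (if max c1 (max c2 c3) = c3 then [3] else [])) (fun x => x) false
    = List.filterMap
        (fun jc => if jc.2 = ((PySem.List.max? [c1, c2, c3] (fun x => x)).getD 0) then some (jc.1 + 1) else none)
        (PySem.List.enumerate [c1, c2, c3] 0) := by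
  have hbest : (PySem.List.max? [c1, c2, c3] (fun x => x)).getD 0 = max c1 (max c2 c3) := by
    rw [PySem.List.max?_id_cons]
    simp [List.foldl_cons, List.foldl_nil, max_assoc]
  rw [hbest]
  generalize max c1 (max c2 c3) = m
  simp only [PySem.List.enumerate_cons, PySem.List.enumerate_nil,
             List.filterMap_cons, List.filterMap_nil]
  simp only [show (c1 = m) ↔ (m = c1) from eq_comm,
             show (c2 = m) ↔ (m = c2) from eq_comm,
             show (c3 = m) ↔ (m = c3) from eq_comm]
  split_ifs <;> decide

theorem solution_spec : Claim_equal_solution := by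
  intro answers _
  unfold Spec_solution solution solution_alt
  simp only []
  rw [PySem.List.foldl_prod_mk
        (f := fun (s : Int) (i : Int) =>
          if PySem.List.pyGetD answers i 0 = PySem.List.pyGetD [1,2,3,4,5] (PySem.Int.mod i 5) 0 then s + 1 else s)
        (g := fun (s : Int × Int) (i : Int) =>
          (if PySem.List.pyGetD answers i 0 = PySem.List.pyGetD [2,1,2,3,2,4,2,5] (PySem.Int.mod i 8) 0 then s.1 + 1 else s.1,
           if PySem.List.pyGetD answers i 0 = PySem.List.pyGetD [3,3,1,1,2,2,4,4,5,5] (PySem.Int.mod i 10) 0 then s.2 + 1 else s.2))]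
  rw [PySem.List.foldl_prod_mk
        (f := fun (s : Int) (i : Int) =>
          if PySem.List.pyGetD answers i 0 = PySem.List.pyGetD [2,1,2,3,2,4,2,5] (PySem.Int.mod i 8) 0 then s + 1 else s)
        (g := fun (s : Int) (i : Int) =>
          if PySem.List.pyGetD answers i 0 = PySem.List.pyGetD [3,3,1,1,2,2,4,4,5,5] (PySem.Int.mod i 10) 0 then s + 1 else s)]
  simp only [List.map_cons, List.map_nil]
  simp only [cnt_eq [1,2,3,4,5] 5 (by norm_num) (by norm_num) (by decide) answers,
      cnt_eq [2,1,2,3,2,4,2,5] 8 (by norm_num) (by norm_num) (by decide) answers,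
      cnt_eq [3,3,1,1,2,2,4,4,5,5] 10 (by norm_num) (by norm_num) (by decide) answers]
  exact final_eq _ _ _
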